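-- pv_equiv track=rewrite | github.com/dofeng/CoarseRL2Mol | model/inverse_layer1.py | _can_partial_match_ports
-- ===== SOURCE A (Python) =====
-- from typing import List, Optional, Dict, Tuple, Set
--
-- def _can_partial_match_ports(neighbors: List[int], port_sets: List[set]) -> bool:
--     """检查当前已分配的邻居是否可以被分配到端口集合的某个子集中
--
--     与 hop1_adjuster._can_match_ports 不同，此函数允许部分填充
--     （len(neighbors) <= len(port_sets)），用于构建过程中的增量验证。
--     """
--     if len(neighbors) > len(port_sets):
--         return False
--     if not neighbors:
--         return True
--
--     used_ports = [False] * len(port_sets)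
--
--     def dfs(ni: int) -> bool:
--         if ni >= len(neighbors):
--             return True
--         n = neighbors[ni]
--         for pi in range(len(port_sets)):
--             if used_ports[pi]:
--                 continue
--             if n not in port_sets[pi]:
--                 continue
--             used_ports[pi] = True
--             if dfs(ni + 1):
--                 return True
--             used_ports[pi] = False
--         return False
--
--     return dfs(0)
-- ===== SOURCE B (Python) =====
-- from typing import List
--
-- def _can_partial_match_ports(neighbors: List[int], port_sets: List[set]) -> bool:
--     """Kuhn's augmenting-path bipartite matching: match each neighbor in turn,
--     rerouting previously matched neighbors along augmenting paths."""
--     if len(neighbors) > len(port_sets):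
--         return False
--     match = [-1] * len(port_sets)  # port index -> neighbor index (or -1)
--
--     def try_match(i: int, visited: set) -> bool:
--         for pi in range(len(port_sets)):
--             if pi in visited or neighbors[i] not in port_sets[pi]:
--                 continue
--             visited.add(pi)
--             j = match[pi]
--             if j == -1 or try_match(j, visited):
--                 match[pi] = i
--                 return True
--         return False
--
--     for i in range(len(neighbors)):
--         if not try_match(i, set()):
--             return False
--     return True
-- ===== Notes on version B (the rewrite author's own statement) =====
-- stated objective: alternative
-- what changed: Replaced A's exhaustive backtracking over complete port assignments by Kuhn's augmenting-path bipartite matching: one augmenting DFS phase per neighbor over a port->neighbor match array, so failures rebind earlier neighbors along augmenting paths instead of re-enumerating assignments.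
import Mathlib
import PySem

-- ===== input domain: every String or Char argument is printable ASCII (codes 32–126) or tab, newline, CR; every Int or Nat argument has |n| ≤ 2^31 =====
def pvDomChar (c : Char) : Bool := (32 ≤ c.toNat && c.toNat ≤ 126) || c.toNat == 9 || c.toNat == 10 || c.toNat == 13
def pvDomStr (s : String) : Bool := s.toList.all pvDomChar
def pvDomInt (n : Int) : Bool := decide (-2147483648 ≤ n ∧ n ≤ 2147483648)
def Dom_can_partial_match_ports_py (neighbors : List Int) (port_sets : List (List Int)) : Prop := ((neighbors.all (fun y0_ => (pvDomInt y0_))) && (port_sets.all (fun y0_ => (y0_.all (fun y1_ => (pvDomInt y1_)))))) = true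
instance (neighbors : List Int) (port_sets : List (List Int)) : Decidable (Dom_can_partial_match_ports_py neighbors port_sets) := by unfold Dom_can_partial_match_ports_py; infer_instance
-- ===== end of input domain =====

-- B replaces A's backtracking search over whole port assignments by Kuhn's augmenting-path
-- bipartite matching (objective: alternative — a genuinely different matching algorithm).

-- ===== PORT A =====
-- A's inner dfs: try every free admissible port for neighbor ni, backtrack on failure.
def pvDfsA (neighbors : List Int) (port_sets : List (List Int)) (ni : Nat) (used : List Bool) : Bool :=
  if _h : neighbors.length ≤ ni then true
  else
    (List.range port_sets.length).any (fun pi =>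
      if used.getD pi false then false
      else if !((port_sets.getD pi []).contains (neighbors.getD ni 0)) then false
      else pvDfsA neighbors port_sets (ni + 1) (used.set pi true))
  termination_by neighbors.length - ni
  decreasing_by omega

def can_partial_match_ports_py (neighbors : List Int) (port_sets : List (List Int)) : Bool :=
  if port_sets.length < neighbors.length then false
  else if neighbors.isEmpty then true
  else pvDfsA neighbors port_sets 0 (List.replicate port_sets.length false)

-- ===== PORT B =====
-- B's try_match: the for-loop over ports pi, threading (visited, match); fuel is only a
-- termination guard (never reached when fuel + |vis| ≥ |ps|, see pvKuhn_false below).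
def pvKuhnLoop (nb : List Int) (ps : List (List Int)) (fuel : Nat) (i : Nat)
    (pis : List Nat) (vis : PySem.Set Nat) (mt : List Int) : Bool × PySem.Set Nat × List Int :=
  match pis with
  | [] => (false, vis, mt)
  | pi :: rest =>
    if PySem.Set.contains vis pi || !((ps.getD pi []).contains (nb.getD i 0)) then
      pvKuhnLoop nb ps fuel i rest vis mt
    else
      let vis1 := PySem.Set.add vis pi
      let j := mt.getD pi (-1)
      if j = -1 then (true, vis1, mt.set pi (i : Int))
      else
        match fuel with
        | 0 => (false, vis1, mt)
        | fuel' + 1 =>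
          match pvKuhnLoop nb ps fuel' j.toNat (List.range ps.length) vis1 mt with
          | (true, vis2, mt2) => (true, vis2, mt2.set pi (i : Int))
          | (false, vis2, mt2) => pvKuhnLoop nb ps (fuel' + 1) i rest vis2 mt2
  termination_by (fuel, pis.length)
  decreasing_by
  · exact Prod.Lex.right _ (by simp)
  · exact Prod.Lex.left _ _ (by omega)
  · exact Prod.Lex.right _ (by simp)

-- B's outer loop: one augmenting phase per neighbor index.
def pvKuhnPhases (nb : List Int) (ps : List (List Int)) (is : List Nat) (mt : List Int) : Bool :=
  match is with
  | [] => true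
  | i :: rest =>
    match pvKuhnLoop nb ps ps.length i (List.range ps.length) PySem.Set.empty mt with
    | (true, _, mt') => pvKuhnPhases nb ps rest mt'
    | (false, _, _) => false

def can_partial_match_ports_py_alt (neighbors : List Int) (port_sets : List (List Int)) : Bool :=
  if port_sets.length < neighbors.length then false
  else pvKuhnPhases neighbors port_sets (List.range neighbors.length)
         (List.replicate port_sets.length (-1))

-- ===== PRECONDITION & SPEC =====
def Spec_can_partial_match_ports_py (neighbors : List Int) (port_sets : List (List Int)) (out : Bool) : Prop := out = can_partial_match_ports_py_alt neighbors port_sets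
instance (neighbors : List Int) (port_sets : List (List Int)) (out : Bool) : Decidable (Spec_can_partial_match_ports_py neighbors port_sets out) := by unfold Spec_can_partial_match_ports_py; infer_instance

-- ===== CLAIM (what is proved, stated in full; the proofs are below) =====
def Claim_equal_can_partial_match_ports_py : Prop := ∀ (neighbors : List Int) (port_sets : List (List Int)), Dom_can_partial_match_ports_py neighbors port_sets → Spec_can_partial_match_ports_py neighbors port_sets (can_partial_match_ports_py neighbors port_sets)

-- ===== LEMMAS AND PROOFS =====

-- `neighbor i may use port pi`
def pvAdjB (nb : List Int) (ps : List (List Int)) (i pi : Nat) : Bool :=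
  (ps.getD pi []).contains (nb.getD i 0)

-- an injective admissible assignment of ALL neighbors to ports
def pvSel (nb : List Int) (ps : List (List Int)) (g : List Nat) : Prop :=
  g.length = nb.length ∧ g.Nodup ∧
  ∀ t, t < g.length → g.getD t 0 < ps.length ∧ pvAdjB nb ps t (g.getD t 0) = true

-- the match list is injective on ports outside vis
def pvInjOut (vis : List Nat) (mt : List Int) : Prop :=
  ∀ p q : Nat, p < mt.length → q < mt.length → p ∉ vis → q ∉ vis →
    mt.getD p (-1) = mt.getD q (-1) → mt.getD p (-1) ≠ -1 → p = q

-- invariant between phases: first i neighbors are matched, injectively, along admissible edges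
def pvInv (nb : List Int) (ps : List (List Int)) (i : Nat) (mt : List Int) : Prop :=
  mt.length = ps.length
  ∧ (∀ p, p < ps.length → mt.getD p (-1) = -1 ∨ ∃ l : Nat, l < i ∧ mt.getD p (-1) = (l : Int))
  ∧ (∀ l : Nat, l < i → ∃ p, p < ps.length ∧ mt.getD p (-1) = (l : Int))
  ∧ pvInjOut [] mt
  ∧ (∀ p, p < ps.length → mt.getD p (-1) ≠ -1 → pvAdjB nb ps (mt.getD p (-1)).toNat p = true)

lemma pv_getD_set (xs : List Int) (i : Nat) (v : Int) (j : Nat) (hi : i < xs.length) :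
    (xs.set i v).getD j (-1) = if j = i then v else xs.getD j (-1) := by
  by_cases h : j = i
  · subst h; simp [List.getD_eq_getElem?_getD, hi]
  · simp [List.getD_eq_getElem?_getD, List.getElem?_set_ne (fun he => h he.symm), h]

lemma pv_getD_set_bool (xs : List Bool) (i : Nat) (j : Nat) (hi : i < xs.length) :
    (xs.set i true).getD j false = if j = i then true else xs.getD j false := by
  by_cases h : j = i
  · subst h; simp [List.getD_eq_getElem?_getD, hi]
  · simp [List.getD_eq_getElem?_getD, List.getElem?_set_ne (fun he => h he.symm), h]

lemma pv_getD_replicate {α : Type} (P p : Nat) (v : α) : (List.replicate P v).getD p v = v := by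
  simp [List.getD_eq_getElem?_getD, List.getElem?_replicate]; split <;> simp

lemma pv_len_le (l1 l2 : List Nat) (h : l1.Nodup) (hs : ∀ v ∈ l1, v ∈ l2) : l1.length ≤ l2.length := by
  calc l1.length = l1.toFinset.card := (List.toFinset_card_of_nodup h).symm
    _ ≤ l2.toFinset.card := Finset.card_le_card (by intro x hx; simp only [List.mem_toFinset] at *; exact hs x hx)
    _ ≤ l2.length := l2.toFinset_card_le

lemma pv_contains_iff (vis : List Nat) (pi : Nat) : PySem.Set.contains vis pi = true ↔ pi ∈ vis := by
  simp [PySem.Set.contains]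

lemma pv_add_eq (vis : List Nat) (pi : Nat) (h : pi ∉ vis) : PySem.Set.add vis pi = vis ++ [pi] := by
  simp only [PySem.Set.add, PySem.Set.contains]
  rw [if_neg (by simp [h])]

lemma pv_nodup_snoc (vis : List Nat) (pi : Nat) (h1 : vis.Nodup) (h2 : pi ∉ vis) :
    (vis ++ [pi]).Nodup := by
  rw [List.nodup_append]
  refine ⟨h1, List.nodup_singleton pi, ?_⟩
  intro a ha b hb
  rw [List.mem_singleton] at hb
  intro he
  rw [hb] at he
  rw [he] at ha
  exact h2 ha

lemma pv_adj_iff (nb : List Int) (ps : List (List Int)) (i pi : Nat) :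
    pvAdjB nb ps i pi = true ↔ (nb[i]?.getD 0) ∈ (ps[pi]?.getD []) := by
  simp [pvAdjB, List.getD_eq_getElem?_getD]

-- A's dfs succeeds iff the remaining neighbors admit an injective assignment to free ports
lemma pvDfsA_iff (nb : List Int) (ps : List (List Int)) :
    ∀ k ni (used : List Bool), nb.length - ni = k → used.length = ps.length →
    (pvDfsA nb ps ni used = true ↔
      ∃ g : List Nat, g.length = nb.length - ni ∧ g.Nodup ∧
        ∀ t, t < g.length → g.getD t 0 < ps.length ∧ used.getD (g.getD t 0) false = false ∧
          pvAdjB nb ps (ni + t) (g.getD t 0) = true) := by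
  intro k
  induction k with
  | zero =>
    intro ni used hk _hlen
    have hni : nb.length ≤ ni := by omega
    rw [pvDfsA]
    simp only [hni, dite_true]
    constructor
    · intro _
      exact ⟨[], by simp; omega, by simp, by intro t ht; simp at ht⟩
    · intro _; trivial
  | succ m ih =>
    intro ni used hk hlen
    have hni : ¬ (nb.length ≤ ni) := by omega
    rw [pvDfsA]
    simp only [hni, dite_false, List.any_eq_true, List.mem_range]
    constructor
    · rintro ⟨pi, hpiP, hbody⟩
      split_ifs at hbody with h1 h2
      have hadj : pvAdjB nb ps ni pi = true := by
        simpa [pvAdjB] using h2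
      have hused : used.getD pi false = false := by simpa using h1
      obtain ⟨g', hg'len, hg'nd, hg'cond⟩ :=
        (ih (ni + 1) (used.set pi true) (by omega) (by simpa using hlen)).mp hbody
      refine ⟨pi :: g', by simp; omega, ?_, ?_⟩
      · rw [List.nodup_cons]
        refine ⟨?_, hg'nd⟩
        intro hmem
        obtain ⟨t, ht, hgt⟩ := List.mem_iff_getElem.mp hmem
        have := (hg'cond t ht).2.1
        rw [List.getD_eq_getElem _ _ ht, hgt,
          pv_getD_set_bool used pi pi (by omega)] at this
        simp at this
      · intro t ht
        match t with
        | 0 =>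
          refine ⟨by simpa using hpiP, by simpa using hused, ?_⟩
          simpa using hadj
        | s + 1 =>
          have hs : s < g'.length := by simpa using ht
          obtain ⟨hP, hu, ha⟩ := hg'cond s hs
          have hgd : (pi :: g').getD (s + 1) 0 = g'.getD s 0 := by simp
          rw [hgd]
          refine ⟨hP, ?_, ?_⟩
          · rw [pv_getD_set_bool used pi _ (by omega)] at hu
            split_ifs at hu with he
            simpa [List.getD_eq_getElem?_getD] using hu
          · have : ni + (s + 1) = ni + 1 + s := by omega
            rw [this]; exact ha
    · rintro ⟨g, hglen, hgnd, hgcond⟩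
      match g, hglen with
      | [], hglen => simp at hglen; omega
      | q :: g', hglen =>
        obtain ⟨hqP, hqu, hqa⟩ := by simpa using hgcond 0 (by simp)
        refine ⟨q, hqP, ?_⟩
        rw [if_neg (by simp [hqu]), if_neg (by simp [pvAdjB] at hqa ⊢; exact hqa)]
        apply (ih (ni + 1) (used.set q true) (by omega) (by simpa using hlen)).mpr
        have hqnotin : q ∉ g' := (List.nodup_cons.mp hgnd).1
        refine ⟨g', by simp at hglen; omega, (List.nodup_cons.mp hgnd).2, ?_⟩
        intro t ht
        obtain ⟨hP, hu, ha⟩ := hgcond (t + 1) (by simpa using Nat.succ_lt_succ ht)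
        have hgd : (q :: g').getD (t + 1) 0 = g'.getD t 0 := by simp
        rw [hgd] at hP hu ha
        refine ⟨hP, ?_, ?_⟩
        · rw [pv_getD_set_bool used q _ (by omega)]
          rw [if_neg ?_]
          · exact hu
          · intro he
            rw [List.getD_eq_getElem _ _ ht] at he
            exact hqnotin (he ▸ List.getElem_mem ht)
        · have : ni + 1 + t = ni + (t + 1) := by omega
          rw [this]; exact ha

lemma pyA_iff (nb : List Int) (ps : List (List Int)) :
    can_partial_match_ports_py nb ps = true ↔
      (nb.length ≤ ps.length ∧ ∃ g, pvSel nb ps g) := by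
  unfold can_partial_match_ports_py
  by_cases hnp : ps.length < nb.length
  · rw [if_pos hnp]
    constructor
    · intro h; simp at h
    · rintro ⟨h, -⟩; omega
  · rw [if_neg hnp]
    by_cases hne : nb.isEmpty
    · have hnil : nb = [] := List.isEmpty_iff.mp hne
      subst hnil
      rw [if_pos (by simp)]
      constructor
      · intro _; exact ⟨by simp, [], by simp [pvSel]⟩
      · intro _; rfl
    · rw [if_neg (by simpa using hne)]
      rw [pvDfsA_iff nb ps (nb.length - 0) 0 (List.replicate ps.length false) rfl (by simp)]
      constructor
      · rintro ⟨g, hlen, hnd, hc⟩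
        refine ⟨by omega, g, by omega, hnd, ?_⟩
        intro t ht
        obtain ⟨h1, _, h3⟩ := hc t ht
        exact ⟨h1, by simpa using h3⟩
      · rintro ⟨hle, g, hlen, hnd, hc⟩
        refine ⟨g, by omega, hnd, ?_⟩
        intro t ht
        obtain ⟨h1, h3⟩ := hc t ht
        exact ⟨h1, by rw [pv_getD_replicate], by simpa using h3⟩

-- Kuhn's dfs, failure: match unchanged, visited only grows, and the visited set is closed:
-- every admissible port of i (among pis) is visited, and every newly visited port is matched
-- to a neighbor all of whose admissible ports are visited.
lemma pvKuhn_false (nb : List Int) (ps : List (List Int)) :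
    ∀ fuel i pis (vis : List Nat) (mt : List Int) vis' mt',
    pvKuhnLoop nb ps fuel i pis vis mt = (false, vis', mt') →
    vis.Nodup → (∀ v ∈ vis, v < ps.length) → (∀ pi ∈ pis, pi < ps.length) →
    ps.length ≤ fuel + vis.length →
    mt' = mt
    ∧ (∀ v ∈ vis, v ∈ vis') ∧ vis'.Nodup ∧ (∀ v ∈ vis', v < ps.length)
    ∧ (∀ pi ∈ pis, pvAdjB nb ps i pi = true → pi ∈ vis')
    ∧ (∀ p ∈ vis', p ∉ vis → mt.getD p (-1) ≠ -1 ∧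
        ∀ q, q < ps.length → pvAdjB nb ps (mt.getD p (-1)).toNat q = true → q ∈ vis') := by
  intro fuel i pis vis mt
  induction fuel, i, pis, vis, mt using pvKuhnLoop.induct nb ps with
  | case1 fuel i vis mt =>
    intro vis' mt' heq hnd hbv _hbp _hf
    rw [pvKuhnLoop] at heq
    simp only [Prod.mk.injEq] at heq
    obtain ⟨-, rfl, rfl⟩ := heq
    exact ⟨rfl, fun v hv => hv, hnd, hbv, by simp, fun p hp hnp => absurd hp hnp⟩
  | case2 fuel i vis mt pi rest hg ih =>
    intro vis' mt' heq hnd hbv hbp hf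
    rw [pvKuhnLoop, if_pos hg] at heq
    obtain ⟨h1, h2, h3, h4, h5, h6⟩ :=
      ih vis' mt' heq hnd hbv (fun x hx => hbp x (List.mem_cons_of_mem _ hx)) hf
    refine ⟨h1, h2, h3, h4, ?_, h6⟩
    intro pi' hpi' hadj
    rcases List.mem_cons.mp hpi' with rfl | hmem
    · simp only [Bool.or_eq_true] at hg
      rcases hg with h | h
      · exact h2 _ ((pv_contains_iff vis pi').mp h)
      · rw [pv_adj_iff] at hadj
        simp [hadj] at h
    · exact h5 pi' hmem hadj
  | case3 fuel i vis mt pi rest hg _j hj =>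
    intro vis' mt' heq _hnd _hbv _hbp _hf
    have hj2 : mt.getD pi (-1) = -1 := hj
    rw [pvKuhnLoop, if_neg hg] at heq
    dsimp only at heq
    rw [if_pos hj2] at heq
    have := congrArg Prod.fst heq
    simp at this
  | case4 i vis mt pi rest hg _j _hj =>
    intro vis' mt' _heq hnd hbv hbp hf
    exfalso
    simp only [Bool.or_eq_true, not_or] at hg
    have hpiv : pi ∉ vis := fun h => absurd ((pv_contains_iff vis pi).mpr h) hg.1
    have hlen : (vis ++ [pi]).length ≤ (List.range ps.length).length :=
      pv_len_le _ _ (pv_nodup_snoc vis pi hnd hpiv) (by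
        intro v hv
        rcases List.mem_append.mp hv with h | h
        · exact List.mem_range.mpr (hbv v h)
        · simp at h; rw [h]; exact List.mem_range.mpr (hbp pi (by simp)))
    simp only [List.length_append, List.length_cons, List.length_nil, List.length_range] at hlen
    omega
  | case5 i vis mt pi rest hg _vis1 _j hj fuel' vis2 mt2 hsub ih =>
    intro vis' mt' heq _hnd _hbv _hbp _hf
    have hj2 : ¬ (mt.getD pi (-1) = -1) := hj
    have hsub2 : pvKuhnLoop nb ps fuel' ((mt.getD pi (-1)).toNat) (List.range ps.length)
        (PySem.Set.add vis pi) mt = (true, vis2, mt2) := hsub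
    rw [pvKuhnLoop, if_neg hg] at heq
    dsimp only at heq
    rw [if_neg hj2, hsub2] at heq
    have := congrArg Prod.fst heq
    simp at this
  | case6 i vis mt pi rest hg _vis1 _j hj fuel' vis2 mt2 hsub ih1 ih2 =>
    intro vis' mt' heq hnd hbv hbp hf
    simp only [Bool.or_eq_true, not_or] at hg
    have hpiv : pi ∉ vis := fun h => absurd ((pv_contains_iff vis pi).mpr h) hg.1
    have hpiP : pi < ps.length := hbp pi (by simp)
    have hadjpi : pvAdjB nb ps i pi = true := by
      rw [pv_adj_iff]
      have := hg.2
      simpa [pvAdjB, List.getD_eq_getElem?_getD] using this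
    have hvis1 : PySem.Set.add vis pi = vis ++ [pi] := pv_add_eq vis pi hpiv
    have hj2 : ¬ (mt.getD pi (-1) = -1) := hj
    have hsub2 : pvKuhnLoop nb ps fuel' ((mt.getD pi (-1)).toNat) (List.range ps.length)
        (PySem.Set.add vis pi) mt = (false, vis2, mt2) := hsub
    rw [pvKuhnLoop, if_neg (by simp only [Bool.or_eq_true, not_or]; exact hg)] at heq
    dsimp only at heq
    rw [if_neg hj2, hsub2] at heq
    dsimp only at heq
    -- heq : pvKuhnLoop nb ps (fuel' + 1) i rest vis2 mt2 = (false, vis', mt')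
    obtain ⟨g1, g2, g3, g4, g5, g6⟩ :=
      ih1 vis2 mt2 hsub
        (by show List.Nodup (PySem.Set.add vis pi); rw [hvis1]; exact pv_nodup_snoc vis pi hnd hpiv)
        (by show ∀ v ∈ PySem.Set.add vis pi, v < ps.length
            rw [hvis1]
            intro v hv
            rcases List.mem_append.mp hv with h | h
            · exact hbv v h
            · simp at h; rw [h]; exact hpiP)
        (fun x hx => List.mem_range.mp hx)
        (by show ps.length ≤ fuel' + (PySem.Set.add vis pi).length
            rw [hvis1]
            simp only [List.length_append, List.length_cons, List.length_nil]
            omega)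
    rw [g1] at heq ih2
    have g2' : ∀ v ∈ vis ++ [pi], v ∈ vis2 := by rw [← hvis1]; exact g2
    have g3' : List.Nodup vis2 := g3
    have g4' : ∀ v ∈ vis2, v < ps.length := g4
    have g5' : ∀ q ∈ List.range ps.length,
        pvAdjB nb ps ((mt.getD pi (-1)).toNat) q = true → q ∈ vis2 := g5
    have g6' : ∀ p ∈ vis2, p ∉ vis ++ [pi] → mt.getD p (-1) ≠ -1 ∧
        ∀ q, q < ps.length → pvAdjB nb ps (mt.getD p (-1)).toNat q = true → q ∈ vis2 := by
      rw [← hvis1]; exact g6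
    have hvv2 : ∀ v ∈ vis, v ∈ vis2 := fun v hv => g2' v (List.mem_append.mpr (Or.inl hv))
    have hpiv2 : pi ∈ vis2 := g2' pi (List.mem_append.mpr (Or.inr (by simp)))
    have hlenv2 : vis.length + 1 ≤ vis2.length := by
      have := pv_len_le (vis ++ [pi]) vis2 (pv_nodup_snoc vis pi hnd hpiv) g2'
      simp only [List.length_append, List.length_cons, List.length_nil] at this
      omega
    obtain ⟨k1, k2, k3, k4, k5, k6⟩ :=
      ih2 vis' mt' heq g3' g4' (fun x hx => hbp x (List.mem_cons_of_mem _ hx)) (by omega)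
    subst k1
    refine ⟨rfl, fun v hv => k2 v (hvv2 v hv), k3, k4, ?_, ?_⟩
    · intro pi' hpi' hadj
      rcases List.mem_cons.mp hpi' with rfl | hmem
      · exact k2 pi' hpiv2
      · exact k5 pi' hmem hadj
    · intro p hp hpv
      by_cases hp2 : p ∈ vis2
      · by_cases hppi : p = pi
        · subst hppi
          refine ⟨hj2, ?_⟩
          intro q hq hadjq
          exact k2 q (g5' q (List.mem_range.mpr hq) hadjq)
        · have hpv1 : p ∉ vis ++ [pi] := by
            intro h
            rcases List.mem_append.mp h with h | h
            · exact hpv h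
            · simp at h; exact hppi h
          obtain ⟨m1, m2⟩ := g6' p hp2 hpv1
          exact ⟨m1, fun q hq hadjq => k2 q (m2 q hq hadjq)⟩
      · obtain ⟨m1, m2⟩ := k6 p hp hp2
        exact ⟨m1, m2⟩

-- Kuhn's dfs, success: ports in vis untouched, i newly matched at exactly one port outside vis,
-- previously matched neighbors stay matched, injectivity/nonnegativity/admissibility preserved,
-- and no value other than i appears at new places outside vis.
lemma pvKuhn_true (nb : List Int) (ps : List (List Int)) :
    ∀ fuel i pis (vis : List Nat) (mt : List Int) vis' mt',
    pvKuhnLoop nb ps fuel i pis vis mt = (true, vis', mt') →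
    mt.length = ps.length →
    vis.Nodup → (∀ v ∈ vis, v < ps.length) → (∀ pi ∈ pis, pi < ps.length) →
    ps.length ≤ fuel + vis.length →
    (∀ p, p < ps.length → p ∉ vis → mt.getD p (-1) ≠ (i : Int)) →
    pvInjOut vis mt →
    (∀ p, p < ps.length → mt.getD p (-1) ≠ -1 → 0 ≤ mt.getD p (-1)) →
    mt'.length = ps.length
    ∧ (∀ p, p ∈ vis → mt'.getD p (-1) = mt.getD p (-1))
    ∧ (∃ q, q < ps.length ∧ q ∉ vis ∧ mt'.getD q (-1) = (i : Int) ∧ pvAdjB nb ps i q = true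
        ∧ ∀ p, p < ps.length → p ∉ vis → p ≠ q → mt'.getD p (-1) ≠ (i : Int))
    ∧ (∀ l : Int, l ≠ -1 → (∃ r, r < ps.length ∧ mt.getD r (-1) = l) → ∃ r, r < ps.length ∧ mt'.getD r (-1) = l)
    ∧ pvInjOut vis mt'
    ∧ (∀ x : Int, x ≠ (i : Int) → (∀ p, p < ps.length → p ∉ vis → mt.getD p (-1) ≠ x) →
        (∀ p, p < ps.length → p ∉ vis → mt'.getD p (-1) ≠ x))
    ∧ (∀ p, p < ps.length → mt'.getD p (-1) ≠ -1 → 0 ≤ mt'.getD p (-1))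
    ∧ ((∀ p, p < ps.length → mt.getD p (-1) ≠ -1 → pvAdjB nb ps (mt.getD p (-1)).toNat p = true) →
       (∀ p, p < ps.length → mt'.getD p (-1) ≠ -1 → pvAdjB nb ps (mt'.getD p (-1)).toNat p = true)) := by
  intro fuel i pis vis mt
  induction fuel, i, pis, vis, mt using pvKuhnLoop.induct nb ps with
  | case1 fuel i vis mt =>
    intro vis' mt' heq _ _ _ _ _ _ _ _
    rw [pvKuhnLoop] at heq
    have := congrArg Prod.fst heq
    simp at this
  | case2 fuel i vis mt pi rest hg ih =>
    intro vis' mt' heq hmt hnd hbv hbp hf hpre hinj hnn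
    rw [pvKuhnLoop, if_pos hg] at heq
    exact ih vis' mt' heq hmt hnd hbv (fun x hx => hbp x (List.mem_cons_of_mem _ hx)) hf hpre hinj hnn
  | case3 fuel i vis mt pi rest hg _j hj =>
    intro vis' mt' heq hmt hnd hbv hbp hf hpre hinj hnn
    simp only [Bool.or_eq_true, not_or] at hg
    have hpiv : pi ∉ vis := fun h => absurd ((pv_contains_iff vis pi).mpr h) hg.1
    have hpiP : pi < ps.length := hbp pi (by simp)
    have hadjpi : pvAdjB nb ps i pi = true := by
      rw [pv_adj_iff]
      simpa [pvAdjB, List.getD_eq_getElem?_getD] using hg.2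
    have hj2 : mt.getD pi (-1) = -1 := hj
    rw [pvKuhnLoop, if_neg (by simp only [Bool.or_eq_true, not_or]; exact hg)] at heq
    dsimp only at heq
    rw [if_pos hj2] at heq
    simp only [Prod.mk.injEq] at heq
    obtain ⟨-, -, rfl⟩ := heq
    have hset : ∀ r, (mt.set pi (i : Int)).getD r (-1) =
        if r = pi then (i : Int) else mt.getD r (-1) :=
      fun r => pv_getD_set mt pi (i : Int) r (by omega)
    refine ⟨by simp [hmt], ?_, ?_, ?_, ?_, ?_, ?_, ?_⟩
    · intro p hp
      rw [hset p, if_neg (fun h => hpiv (by rw [← h]; exact hp))]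
    · refine ⟨pi, hpiP, hpiv, by rw [hset pi, if_pos rfl], hadjpi, ?_⟩
      intro p hpP hpv hppi
      rw [hset p, if_neg hppi]
      exact hpre p hpP hpv
    · intro l hl ⟨r, hrP, hrl⟩
      by_cases hrpi : r = pi
      · rw [hrpi, hj2] at hrl
        exact absurd hrl.symm hl
      · exact ⟨r, hrP, by rw [hset r, if_neg hrpi]; exact hrl⟩
    · intro p q hpL hqL hpv hqv hpq hne
      simp only [List.length_set] at hpL hqL
      rw [hset p, hset q] at hpq
      rw [hset p] at hne
      by_cases hp : p = pi <;> by_cases hq : q = pi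
      · rw [hp, hq]
      · rw [if_pos hp] at hpq
        rw [if_neg hq] at hpq
        exact absurd hpq.symm (hpre q (by omega) hqv)
      · rw [if_neg hp, if_pos hq] at hpq
        exact absurd hpq (hpre p (by omega) hpv)
      · rw [if_neg hp] at hpq hne
        rw [if_neg hq] at hpq
        exact hinj p q (by omega) (by omega) hpv hqv hpq hne
    · intro x hx hfree p hpP hpv
      rw [hset p]
      by_cases hp : p = pi
      · rw [if_pos hp]; exact fun h => hx h.symm
      · rw [if_neg hp]; exact hfree p hpP hpv
    · intro p hpP
      rw [hset p]
      by_cases hp : p = pi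
      · rw [if_pos hp]; intro _; exact Int.natCast_nonneg i
      · rw [if_neg hp]; exact hnn p hpP
    · intro hva p hpP
      rw [hset p]
      by_cases hp : p = pi
      · rw [if_pos hp, hp]; intro _; simpa using hadjpi
      · rw [if_neg hp]; exact hva p hpP
  | case4 i vis mt pi rest hg _j _hj =>
    intro vis' mt' heq _ _ _ _ _ _ _ _
    simp only [Bool.or_eq_true, not_or] at hg
    have hj2 : ¬ (mt.getD pi (-1) = -1) := _hj
    rw [pvKuhnLoop, if_neg (by simp only [Bool.or_eq_true, not_or]; exact hg)] at heq
    dsimp only at heq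
    rw [if_neg hj2] at heq
    have := congrArg Prod.fst heq
    simp at this
  | case5 i vis mt pi rest hg _vis1 _j hj fuel' vis2 mt2 hsub ih =>
    intro vis' mt' heq hmt hnd hbv hbp hf hpre hinj hnn
    simp only [Bool.or_eq_true, not_or] at hg
    have hpiv : pi ∉ vis := fun h => absurd ((pv_contains_iff vis pi).mpr h) hg.1
    have hpiP : pi < ps.length := hbp pi (by simp)
    have hadjpi : pvAdjB nb ps i pi = true := by
      rw [pv_adj_iff]
      simpa [pvAdjB, List.getD_eq_getElem?_getD] using hg.2
    have hvis1 : PySem.Set.add vis pi = vis ++ [pi] := pv_add_eq vis pi hpiv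
    have hj2 : ¬ (mt.getD pi (-1) = -1) := hj
    have hjnn : 0 ≤ mt.getD pi (-1) := hnn pi hpiP hj2
    have hjcast : ((mt.getD pi (-1)).toNat : Int) = mt.getD pi (-1) := Int.toNat_of_nonneg hjnn
    have hji : ¬ ((mt.getD pi (-1)) = (i : Int)) := hpre pi hpiP hpiv
    have hsub2 : pvKuhnLoop nb ps fuel' ((mt.getD pi (-1)).toNat) (List.range ps.length)
        (PySem.Set.add vis pi) mt = (true, vis2, mt2) := hsub
    rw [pvKuhnLoop, if_neg (by simp only [Bool.or_eq_true, not_or]; exact hg)] at heq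
    dsimp only at heq
    rw [if_neg hj2, hsub2] at heq
    dsimp only at heq
    simp only [Prod.mk.injEq] at heq
    obtain ⟨-, -, rfl⟩ := heq
    have hnotin1 : ∀ p : Nat, p ∉ vis → p ≠ pi → p ∉ vis ++ [pi] := by
      intro p h1 h2 h
      rcases List.mem_append.mp h with h | h
      · exact h1 h
      · simp at h; exact h2 h
    obtain ⟨c0, c1, c2, c3, c5, c7, cnn, c8⟩ :=
      ih vis2 mt2 hsub
        hmt
        (by show List.Nodup (PySem.Set.add vis pi); rw [hvis1]; exact pv_nodup_snoc vis pi hnd hpiv)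
        (by show ∀ v ∈ PySem.Set.add vis pi, v < ps.length
            rw [hvis1]
            intro v hv
            rcases List.mem_append.mp hv with h | h
            · exact hbv v h
            · simp at h; rw [h]; exact hpiP)
        (fun x hx => List.mem_range.mp hx)
        (by show ps.length ≤ fuel' + (PySem.Set.add vis pi).length
            rw [hvis1]
            simp only [List.length_append, List.length_cons, List.length_nil]
            omega)
        (by show ∀ p, p < ps.length → p ∉ PySem.Set.add vis pi → mt.getD p (-1) ≠ ((mt.getD pi (-1)).toNat : Int)
            rw [hvis1]
            intro p hpP hp1 h
            rw [hjcast] at h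
            have hppi : p ≠ pi := fun he => hp1 (he ▸ List.mem_append.mpr (Or.inr (by simp)))
            have hpv : p ∉ vis := fun he => hp1 (List.mem_append.mpr (Or.inl he))
            have hne : mt.getD p (-1) ≠ -1 := by rw [h]; exact hj2
            exact hppi (hinj p pi (by omega) (by omega) hpv hpiv h hne))
        (by show pvInjOut (PySem.Set.add vis pi) mt
            rw [hvis1]
            intro p q hpL hqL hpv hqv hpq hne
            exact hinj p q hpL hqL (fun h => hpv (List.mem_append.mpr (Or.inl h)))
              (fun h => hqv (List.mem_append.mpr (Or.inl h))) hpq hne)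
        hnn
    -- conclusions of the sub-call, with vis1 rewritten to vis ++ [pi]
    have c1' : ∀ p ∈ vis ++ [pi], mt2.getD p (-1) = mt.getD p (-1) := by rw [← hvis1]; exact c1
    obtain ⟨qs, hqsP, hqsv1, hqsval, _hqsadj, hqsuniq⟩ := c2
    have hqsv1' : qs ∉ vis ++ [pi] := by rw [← hvis1] at *; exact hqsv1
    have hqsuniq' : ∀ p, p < ps.length → p ∉ vis ++ [pi] → p ≠ qs →
        mt2.getD p (-1) ≠ ((mt.getD pi (-1)).toNat : Int) := by
      rw [← hvis1] at *; exact hqsuniq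
    have c7' : ∀ x : Int, x ≠ ((mt.getD pi (-1)).toNat : Int) →
        (∀ p, p < ps.length → p ∉ vis ++ [pi] → mt.getD p (-1) ≠ x) →
        (∀ p, p < ps.length → p ∉ vis ++ [pi] → mt2.getD p (-1) ≠ x) := by
      rw [← hvis1] at *; exact c7
    have c5' : pvInjOut (vis ++ [pi]) mt2 := by rw [← hvis1] at *; exact c5
    have hpimt2 : pi < mt2.length := by omega
    have hset : ∀ r, (mt2.set pi (i : Int)).getD r (-1) =
        if r = pi then (i : Int) else mt2.getD r (-1) :=
      fun r => pv_getD_set mt2 pi (i : Int) r hpimt2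
    have hmtpi2 : mt2.getD pi (-1) = mt.getD pi (-1) :=
      c1' pi (List.mem_append.mpr (Or.inr (by simp)))
    -- no port outside vis except pi carries value i in mt2
    have hnoti : ∀ p, p < ps.length → p ∉ vis → p ≠ pi → mt2.getD p (-1) ≠ (i : Int) := by
      intro p hpP hpv hppi
      refine c7' (i : Int) (by rw [hjcast]; exact fun h => hji h.symm) ?_ p hpP (hnotin1 p hpv hppi)
      intro r hrP hr1
      exact hpre r hrP (fun h => hr1 (List.mem_append.mpr (Or.inl h)))
    refine ⟨by simpa using c0, ?_, ?_, ?_, ?_, ?_, ?_, ?_⟩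
    · intro p hp
      rw [hset p, if_neg (fun h => hpiv (by rw [← h]; exact hp))]
      exact c1' p (List.mem_append.mpr (Or.inl hp))
    · refine ⟨pi, hpiP, hpiv, by rw [hset pi, if_pos rfl], hadjpi, ?_⟩
      intro p hpP hpv hppi
      rw [hset p, if_neg hppi]
      exact hnoti p hpP hpv hppi
    · intro l hl ⟨r, hrP, hrl⟩
      obtain ⟨r2, hr2P, hr2l⟩ := c3 l hl ⟨r, hrP, hrl⟩
      by_cases hr2pi : r2 = pi
      · -- mt2 r2 = mt2 pi = mt pi = j ; j is also at qs ≠ pi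
        refine ⟨qs, hqsP, ?_⟩
        rw [hset qs, if_neg (fun h => (by simp [h] at hqsv1' : ¬ True) trivial)]
        · rw [hqsval, hjcast, ← hmtpi2, ← hr2pi, hr2l]
      · exact ⟨r2, hr2P, by rw [hset r2, if_neg hr2pi]; exact hr2l⟩
    · intro p q hpL hqL hpv hqv hpq hne
      simp only [List.length_set] at hpL hqL
      rw [hset p, hset q] at hpq
      rw [hset p] at hne
      by_cases hp : p = pi <;> by_cases hq : q = pi
      · rw [hp, hq]
      · rw [if_pos hp] at hpq
        rw [if_neg hq] at hpq
        exact absurd hpq.symm (hnoti q (by omega) hqv hq)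
      · rw [if_neg hp, if_pos hq] at hpq
        exact absurd hpq (hnoti p (by omega) hpv hp)
      · rw [if_neg hp] at hpq hne
        rw [if_neg hq] at hpq
        exact c5' p q (by omega) (by omega) (hnotin1 p hpv hp) (hnotin1 q hqv hq) hpq hne
    · intro x hx hfree p hpP hpv
      rw [hset p]
      by_cases hp : p = pi
      · rw [if_pos hp]; exact fun h => hx h.symm
      · rw [if_neg hp]
        have hxj : x ≠ (mt.getD pi (-1)) := by
          intro h
          exact hfree pi hpiP hpiv (h ▸ rfl)
        exact c7' x (by rw [hjcast]; exact hxj)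
          (fun r hrP hr1 => hfree r hrP (fun h => hr1 (List.mem_append.mpr (Or.inl h))))
          p hpP (hnotin1 p hpv hp)
    · intro p hpP
      rw [hset p]
      by_cases hp : p = pi
      · rw [if_pos hp]; intro _; exact Int.natCast_nonneg i
      · rw [if_neg hp]; exact cnn p hpP
    · intro hva p hpP
      rw [hset p]
      by_cases hp : p = pi
      · rw [if_pos hp, hp]; intro _; simpa using hadjpi
      · rw [if_neg hp]; exact c8 hva p hpP
  | case6 i vis mt pi rest hg _vis1 _j hj fuel' vis2 mt2 hsub ih1 ih2 =>
    intro vis' mt' heq hmt hnd hbv hbp hf hpre hinj hnn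
    simp only [Bool.or_eq_true, not_or] at hg
    have hpiv : pi ∉ vis := fun h => absurd ((pv_contains_iff vis pi).mpr h) hg.1
    have hpiP : pi < ps.length := hbp pi (by simp)
    have hvis1 : PySem.Set.add vis pi = vis ++ [pi] := pv_add_eq vis pi hpiv
    have hj2 : ¬ (mt.getD pi (-1) = -1) := hj
    have hsub2 : pvKuhnLoop nb ps fuel' ((mt.getD pi (-1)).toNat) (List.range ps.length)
        (PySem.Set.add vis pi) mt = (false, vis2, mt2) := hsub
    rw [pvKuhnLoop, if_neg (by simp only [Bool.or_eq_true, not_or]; exact hg)] at heq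
    dsimp only at heq
    rw [if_neg hj2, hsub2] at heq
    dsimp only at heq
    -- the failed sub-search left the match unchanged and only grew the visited set
    obtain ⟨g1, g2, g3, g4, _g5, _g6⟩ :=
      pvKuhn_false nb ps fuel' ((mt.getD pi (-1)).toNat) (List.range ps.length)
        (PySem.Set.add vis pi) mt vis2 mt2 hsub2
        (by rw [hvis1]; exact pv_nodup_snoc vis pi hnd hpiv)
        (by rw [hvis1]
            intro v hv
            rcases List.mem_append.mp hv with h | h
            · exact hbv v h
            · simp at h; rw [h]; exact hpiP)
        (fun x hx => List.mem_range.mp hx)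
        (by rw [hvis1]
            simp only [List.length_append, List.length_cons, List.length_nil]
            omega)
    rw [g1] at heq ih2
    have g2' : ∀ v ∈ vis ++ [pi], v ∈ vis2 := by rw [← hvis1]; exact g2
    have hvv2 : ∀ v ∈ vis, v ∈ vis2 := fun v hv => g2' v (List.mem_append.mpr (Or.inl hv))
    have hlenv2 : vis.length + 1 ≤ vis2.length := by
      have := pv_len_le (vis ++ [pi]) vis2 (pv_nodup_snoc vis pi hnd hpiv) g2'
      simp only [List.length_append, List.length_cons, List.length_nil] at this
      omega
    obtain ⟨k0, k1, k2, k3, k5, k7, knn, k8⟩ :=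
      ih2 vis' mt' heq hmt g3 g4 (fun x hx => hbp x (List.mem_cons_of_mem _ hx)) (by omega)
        (fun p hpP hpv => hpre p hpP (fun h => hpv (hvv2 p h)))
        (by intro p q hpL hqL hpv hqv hpq hne
            exact hinj p q hpL hqL (fun h => hpv (hvv2 p h)) (fun h => hqv (hvv2 q h)) hpq hne)
        hnn
    obtain ⟨qk, hqkP, hqkv2, hqkval, hqkadj, hqkuniq⟩ := k2
    -- a value of mt outside vis kept outside vis2 stays put; used for injectivity transfer
    have fresh : ∀ p, p < ps.length → p ∉ vis → p ∈ vis2 →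
        ∀ q, q < ps.length → q ∉ vis2 → mt'.getD q (-1) ≠ mt.getD p (-1) ∨ mt.getD p (-1) = -1 := by
      intro p hpP hpv hp2 q hqP hq2
      by_cases hmtp : mt.getD p (-1) = -1
      · exact Or.inr hmtp
      · refine Or.inl (k7 (mt.getD p (-1)) (hpre p hpP hpv) ?_ q hqP hq2)
        intro r hrP hr2 h
        have : r = p := hinj r p (by omega) (by omega) (fun hh => hr2 (hvv2 r hh)) hpv h
          (by rw [h]; exact hmtp)
        exact hr2 (this ▸ hp2)
    refine ⟨k0, ?_, ?_, k3, ?_, ?_, knn, k8⟩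
    · intro p hp
      exact k1 p (hvv2 p hp)
    · refine ⟨qk, hqkP, fun h => hqkv2 (hvv2 qk h), hqkval, hqkadj, ?_⟩
      intro p hpP hpv hpqk
      by_cases hp2 : p ∈ vis2
      · rw [k1 p hp2]
        exact hpre p hpP hpv
      · exact hqkuniq p hpP hp2 hpqk
    · intro p q hpL hqL hpv hqv hpq hne
      by_cases hp2 : p ∈ vis2 <;> by_cases hq2 : q ∈ vis2
      · rw [k1 p hp2, k1 q hq2] at hpq
        rw [k1 p hp2] at hne
        exact hinj p q (by omega) (by omega) hpv hqv hpq hne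
      · exfalso
        rw [k1 p hp2] at hpq hne
        rcases fresh p (by omega) hpv hp2 q (by omega) hq2 with h | h
        · exact h hpq.symm
        · exact hne h
      · exfalso
        rw [k1 q hq2] at hpq
        rcases fresh q (by omega) hqv hq2 p (by omega) hp2 with h | h
        · exact h hpq
        · rw [hpq] at hne; exact hne h
      · exact k5 p q hpL hqL hp2 hq2 hpq hne
    · intro x hx hfree p hpP hpv
      by_cases hp2 : p ∈ vis2
      · rw [k1 p hp2]
        exact hfree p hpP hpv
      · exact k7 x hx (fun r hrP hr2 => hfree r hrP (fun h => hr2 (hvv2 r h))) p hpP hp2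

lemma pvPhase_succ (nb : List Int) (ps : List (List Int)) (i : Nat) (mt : List Int)
    (vis' : List Nat) (mt' : List Int)
    (h : pvKuhnLoop nb ps ps.length i (List.range ps.length) PySem.Set.empty mt = (true, vis', mt'))
    (hinv : pvInv nb ps i mt) : pvInv nb ps (i + 1) mt' := by
  obtain ⟨hlen, hval, hcov, hinj, hadj⟩ := hinv
  obtain ⟨s0, _s1, s2, s3, s5, s7, _snn, s8⟩ :=
    pvKuhn_true nb ps ps.length i (List.range ps.length) PySem.Set.empty mt vis' mt' h
      hlen List.nodup_nil (fun v hv => absurd hv (List.not_mem_nil))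
      (fun x hx => List.mem_range.mp hx) (by simp)
      (by intro p hpP _
          rcases hval p hpP with hm | ⟨l, hl, hm⟩
          · rw [hm]; intro hc; omega
          · rw [hm]; intro hc
            have : l = i := by exact_mod_cast hc
            omega)
      hinj
      (by intro p hpP hne
          rcases hval p hpP with hm | ⟨l, hl, hm⟩
          · exact absurd hm hne
          · rw [hm]; exact Int.natCast_nonneg l)
  refine ⟨s0, ?_, ?_, s5, s8 hadj⟩
  · intro p hpP
    by_cases hm : mt'.getD p (-1) = -1
    · exact Or.inl hm
    · by_cases hmi : mt'.getD p (-1) = (i : Int)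
      · exact Or.inr ⟨i, by omega, hmi⟩
      · have hold : ∃ r, r < ps.length ∧ mt.getD r (-1) = mt'.getD p (-1) := by
          by_contra hc
          push Not at hc
          exact s7 (mt'.getD p (-1)) hmi
            (fun r hrP _ => hc r hrP) p hpP List.not_mem_nil rfl
        obtain ⟨r, hrP, hr⟩ := hold
        rcases hval r hrP with hm2 | ⟨l, hl, hm2⟩
        · rw [hm2] at hr; exact absurd hr.symm hm
        · rw [hm2] at hr
          exact Or.inr ⟨l, by omega, hr.symm⟩
  · intro l hl
    by_cases hli : l = i
    · obtain ⟨q, hqP, _, hqval, -, -⟩ := s2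
      exact ⟨q, hqP, by rw [hqval, hli]⟩
    · have hl' : l < i := by omega
      obtain ⟨p, hpP, hp⟩ := hcov l hl'
      exact s3 (l : Int) (by omega) ⟨p, hpP, hp⟩

-- a failed phase yields a Hall violator: |vis'|+1 neighbors whose admissible ports all lie in vis'
lemma pvPhase_fail (nb : List Int) (ps : List (List Int)) (i : Nat) (mt : List Int)
    (vis' : List Nat) (mt' : List Int)
    (h : pvKuhnLoop nb ps ps.length i (List.range ps.length) PySem.Set.empty mt = (false, vis', mt'))
    (hinv : pvInv nb ps i mt) (hi : i < nb.length) : ¬ ∃ g, pvSel nb ps g := by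
  rintro ⟨g, hglen, hgnd, hgcond⟩
  obtain ⟨hlen, hval, hcov, hinj, hadj⟩ := hinv
  obtain ⟨-, -, hWnd, hWb, f3, f4⟩ :=
    pvKuhn_false nb ps ps.length i (List.range ps.length) PySem.Set.empty mt vis' mt' h
      List.nodup_nil (fun v hv => absurd hv List.not_mem_nil)
      (fun x hx => List.mem_range.mp hx) (by simp)
  -- the Hall violator: i together with the neighbors matched on the visited ports
  have hWmem : ∀ p ∈ vis'.toFinset, ∃ l : Nat, l < i ∧ mt.getD p (-1) = (l : Int) := by
    intro p hp
    rw [List.mem_toFinset] at hp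
    obtain ⟨hne, -⟩ := f4 p hp List.not_mem_nil
    rcases hval p (hWb p hp) with hm | hm
    · exact absurd hm hne
    · exact hm
  have himinj : Set.InjOn (fun p => (mt.getD p (-1)).toNat) vis'.toFinset := by
    intro p hp q hq hpq
    rw [Finset.mem_coe] at hp hq
    obtain ⟨lp, hlp, hmp⟩ := hWmem p hp
    obtain ⟨lq, hlq, hmq⟩ := hWmem q hq
    rw [List.mem_toFinset] at hp hq
    simp only [hmp, hmq, Int.toNat_natCast] at hpq
    refine hinj p q (by rw [hlen]; exact hWb p hp) (by rw [hlen]; exact hWb q hq)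
      List.not_mem_nil List.not_mem_nil ?_ (by rw [hmp]; omega)
    rw [hmp, hmq, hpq]
  have hiL : i ∉ vis'.toFinset.image (fun p => (mt.getD p (-1)).toNat) := by
    intro hmem
    obtain ⟨p, hp, hpi⟩ := Finset.mem_image.mp hmem
    obtain ⟨lp, hlp, hmp⟩ := hWmem p hp
    rw [hmp, Int.toNat_natCast] at hpi
    omega
  have hLlt : ∀ l ∈ insert i (vis'.toFinset.image (fun p => (mt.getD p (-1)).toNat)),
      l < nb.length := by
    intro l hl
    rcases Finset.mem_insert.mp hl with rfl | hl
    · exact hi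
    · obtain ⟨p, hp, hpl⟩ := Finset.mem_image.mp hl
      obtain ⟨lp, hlp, hmp⟩ := hWmem p hp
      rw [hmp, Int.toNat_natCast] at hpl
      omega
  have hφW : ∀ l ∈ insert i (vis'.toFinset.image (fun p => (mt.getD p (-1)).toNat)),
      g.getD l 0 ∈ vis'.toFinset := by
    intro l hl
    have hln : l < nb.length := hLlt l hl
    obtain ⟨hgP, hgadj⟩ := hgcond l (by omega)
    rw [List.mem_toFinset]
    rcases Finset.mem_insert.mp hl with rfl | hl
    · exact f3 (g.getD l 0) (List.mem_range.mpr hgP) hgadj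
    · obtain ⟨p, hp, hpl⟩ := Finset.mem_image.mp hl
      rw [List.mem_toFinset] at hp
      obtain ⟨-, hclose⟩ := f4 p hp List.not_mem_nil
      exact hclose (g.getD l 0) hgP (by rw [hpl]; exact hgadj)
  have hφinj : Set.InjOn (fun l => g.getD l 0)
      (↑(insert i (vis'.toFinset.image (fun p => (mt.getD p (-1)).toNat))) : Set Nat) := by
    intro a ha b hb hab
    rw [Finset.mem_coe] at ha hb
    have haN : a < g.length := by rw [hglen]; exact hLlt a ha
    have hbN : b < g.length := by rw [hglen]; exact hLlt b hb
    simp only [List.getD_eq_getElem _ _ haN, List.getD_eq_getElem _ _ hbN] at hab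
    exact (List.Nodup.getElem_inj_iff hgnd).mp hab
  have hcard := Finset.card_le_card_of_injOn _ hφW hφinj
  rw [Finset.card_insert_of_notMem hiL, Finset.card_image_of_injOn himinj,
    List.toFinset_card_of_nodup hWnd] at hcard
  have := List.toFinset_card_le vis'
  omega

lemma pvPhases_iff (nb : List Int) (ps : List (List Int)) :
    ∀ c k (mt : List Int), nb.length - k = c → k ≤ nb.length → pvInv nb ps k mt →
    (pvKuhnPhases nb ps (List.range' k (nb.length - k)) mt = true ↔ ∃ g, pvSel nb ps g) := by
  intro c
  induction c with
  | zero =>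
    intro k mt hc hk hinv
    have hkn : k = nb.length := by omega
    subst hkn
    rw [hc, List.range'_zero]
    have hnil : pvKuhnPhases nb ps [] mt = true := rfl
    rw [hnil]
    simp only [true_iff]
    obtain ⟨hlen, hval, hcov, hinj, hadj⟩ := hinv
    have hfind : ∀ l, l < nb.length → ∃ p, ((List.range ps.length).find?
        (fun p => decide (mt.getD p (-1) = (l : Int)))) = some p ∧ p < ps.length ∧
        mt.getD p (-1) = (l : Int) := by
      intro l hl
      obtain ⟨p0, hp0P, hp0⟩ := hcov l hl
      have hsome : ((List.range ps.length).find?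
          (fun p => decide (mt.getD p (-1) = (l : Int)))).isSome := by
        rw [List.find?_isSome]
        refine ⟨p0, List.mem_range.mpr hp0P, ?_⟩
        simp only [decide_eq_true_eq]
        exact hp0
      obtain ⟨p, hp⟩ := Option.isSome_iff_exists.mp hsome
      refine ⟨p, hp, ?_, ?_⟩
      · exact List.mem_range.mp (List.mem_of_find?_eq_some hp)
      · simpa using List.find?_some hp
    set G := (List.range nb.length).map (fun (l : Nat) =>
      ((List.range ps.length).find? (fun p => decide (mt.getD p (-1) = (l : Int)))).getD 0) with hG
    have hGlen : G.length = nb.length := by simp [hG]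
    have hgd : ∀ t, t < nb.length → G.getD t 0 =
        ((List.range ps.length).find? (fun p => decide (mt.getD p (-1) = (t : Int)))).getD 0 := by
      intro t ht
      rw [List.getD_eq_getElem _ _ (by rw [hGlen]; exact ht)]
      simp [hG]
    have hprop : ∀ t, t < nb.length →
        G.getD t 0 < ps.length ∧ mt.getD (G.getD t 0) (-1) = (t : Int) := by
      intro t ht
      obtain ⟨pt, hpt, hptP, hptv⟩ := hfind t ht
      rw [hgd t ht, hpt, Option.getD_some]
      exact ⟨hptP, hptv⟩
    refine ⟨G, hGlen, ?_, ?_⟩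
    · rw [List.nodup_iff_injective_get]
      intro a b hab
      have ha' : G.getD a.1 0 = G.getD b.1 0 := by
        rw [List.getD_eq_getElem _ _ a.2, List.getD_eq_getElem _ _ b.2]
        simpa [List.get_eq_getElem] using hab
      have h1 := (hprop a.1 (by rw [← hGlen]; exact a.2)).2
      have h2 := (hprop b.1 (by rw [← hGlen]; exact b.2)).2
      rw [ha'] at h1
      rw [h1] at h2
      exact Fin.ext (by exact_mod_cast h2)
    · intro t ht
      rw [hGlen] at ht
      obtain ⟨hP, hv⟩ := hprop t ht
      refine ⟨hP, ?_⟩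
      have := hadj (G.getD t 0) hP (by rw [hv]; omega)
      rw [hv, Int.toNat_natCast] at this
      exact this
  | succ c ih =>
    intro k mt hc hk hinv
    have hrange : List.range' k (nb.length - k) = k :: List.range' (k + 1) (nb.length - (k + 1)) := by
      have h1 : nb.length - k = (nb.length - (k + 1)) + 1 := by omega
      rw [h1, List.range'_succ]
    rw [hrange, pvKuhnPhases]
    rcases hres : pvKuhnLoop nb ps ps.length k (List.range ps.length) PySem.Set.empty mt
      with ⟨ok, visx, mtx⟩
    cases ok
    · dsimp only
      constructor
      · intro hfalse; exact absurd hfalse (by simp)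
      · intro hg
        exact absurd hg (pvPhase_fail nb ps k mt visx mtx hres hinv (by omega))
    · dsimp only
      exact ih (k + 1) mtx (by omega) (by omega)
        (pvPhase_succ nb ps k mt visx mtx hres hinv)

lemma pyB_iff (nb : List Int) (ps : List (List Int)) :
    can_partial_match_ports_py_alt nb ps = true ↔
      (nb.length ≤ ps.length ∧ ∃ g, pvSel nb ps g) := by
  unfold can_partial_match_ports_py_alt
  by_cases hnp : ps.length < nb.length
  · rw [if_pos hnp]
    constructor
    · intro h; simp at h
    · rintro ⟨h, -⟩; omega
  · rw [if_neg hnp]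
    have hinv0 : pvInv nb ps 0 (List.replicate ps.length (-1)) := by
      refine ⟨by simp, ?_, by omega, ?_, ?_⟩
      · intro p _; exact Or.inl (pv_getD_replicate ps.length p (-1))
      · intro p q _ _ _ _ _ hne
        exact absurd (pv_getD_replicate ps.length p (-1)) hne
      · intro p _ hne
        exact absurd (pv_getD_replicate ps.length p (-1)) hne
    have := pvPhases_iff nb ps (nb.length - 0) 0 (List.replicate ps.length (-1))
      rfl (by omega) hinv0
    rw [Nat.sub_zero] at this
    rw [← List.range_eq_range'] at this
    rw [this]
    constructor
    · intro hg; exact ⟨by omega, hg⟩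
    · rintro ⟨-, hg⟩; exact hg

-- ===== VERDICT (by name: the statement is the Claim_ definition above) =====
theorem can_partial_match_ports_py_spec : Claim_equal_can_partial_match_ports_py := by
  intro nb ps _
  unfold Spec_can_partial_match_ports_py
  have hA := pyA_iff nb ps
  have hB := pyB_iff nb ps
  cases h1 : can_partial_match_ports_py nb ps <;>
    cases h2 : can_partial_match_ports_py_alt nb ps <;> simp_all
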